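-- pv_equiv track=rewrite | github.com/CanYouTeachMeHowToCode/2048-python-game | RL.py | getWeightBoard
-- ===== SOURCE A (Python) =====
-- def getWeightBoard(size):
--     board = [[(row * size + col) for col in range(size)] for row in range(size)]
--     for row in range(size):
--         if row % 2 : board[row] = board[row][::-1]
--     for row in range(size):
--         for col in range(size):
--             exp = board[row][col]
--             board[row][col] = 4 ** exp
--     return board
-- ===== SOURCE B (Python) =====
-- def getWeightBoard(size):
--     # Build the first row with a running product, then derive each next row
--     # from the previous one: reverse it and scale every entry by 4**size
--     # (the snake layout makes row r+1 exactly that transform of row r).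
--     row, w, scale = [], 1, 1
--     for _ in range(size):
--         row.append(w)
--         w *= 4
--         scale *= 4
--     board = []
--     for _ in range(size):
--         board.append(row)
--         row = [x * scale for x in reversed(row)]
--     return board
-- ===== Notes on version B (the rewrite author's own statement) =====
-- stated objective: alternative
-- what changed: B never computes a snake index or a per-cell power: it builds the first row by a running product and derives each subsequent row from the previous one by reversing it and scaling every entry by one precomputed constant, instead of A's index matrix + odd-row reversal + per-cell exponentiation passes.
import Mathlib
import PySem

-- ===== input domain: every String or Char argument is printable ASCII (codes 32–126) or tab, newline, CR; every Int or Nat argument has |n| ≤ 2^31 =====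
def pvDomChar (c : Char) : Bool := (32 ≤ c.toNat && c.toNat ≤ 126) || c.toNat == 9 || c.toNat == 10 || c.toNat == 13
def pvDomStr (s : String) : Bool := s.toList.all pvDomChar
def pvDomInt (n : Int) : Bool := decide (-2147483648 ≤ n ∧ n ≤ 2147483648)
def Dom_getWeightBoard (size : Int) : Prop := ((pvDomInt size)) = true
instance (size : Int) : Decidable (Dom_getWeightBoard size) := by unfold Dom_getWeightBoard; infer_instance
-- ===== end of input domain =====

-- B replaces A's index matrix + odd-row reversal + per-cell exponentiation with a running
-- product for the first row and the row recurrence next = (prev reversed, each * 4^size)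
-- (objective: alternative decomposition, no power/index computed per cell).

-- ===== PORT A =====
-- A: build index matrix, reverse odd rows in place (board[row] = board[row][::-1]),
-- then replace each cell by 4 ** cell.  Loop indices row/col come from range(size),
-- hence are ≥ 0, so `.toNat` on them is exact; the exponent is ≥ 0 on every cell,
-- so `4 ** exp` is `4 ^ exp.toNat`.
def getWeightBoard (size : Int) : List (List Int) :=
  let board : List (List Int) :=
    (PySem.List.pyRange 0 size 1).map (fun row =>
      (PySem.List.pyRange 0 size 1).map (fun col => row * size + col))
  let board :=
    (PySem.List.pyRange 0 size 1).foldl (fun b row =>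
      if row % 2 ≠ 0 then
        b.modify row.toNat (fun r => (PySem.List.slice? r none none (-1)).getD [])
      else b) board
  (PySem.List.pyRange 0 size 1).foldl (fun b row =>
    (PySem.List.pyRange 0 size 1).foldl (fun b col =>
      b.modify row.toNat (fun r => r.modify col.toNat (fun e => 4 ^ e.toNat))) b) board

-- ===== PORT B =====
-- B: first loop builds (row, w, scale) by running products; second loop appends the
-- current row and replaces it by its reverse scaled by `scale` (= 4^size).
def getWeightBoard_alt (size : Int) : List (List Int) :=
  let init : List Int × Int × Int :=
    (PySem.List.pyRange 0 size 1).foldl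
      (fun st _ => (st.1 ++ [st.2.1], st.2.1 * 4, st.2.2 * 4)) ([], 1, 1)
  let scale := init.2.2
  ((PySem.List.pyRange 0 size 1).foldl
      (fun (st : List (List Int) × List Int) _ =>
        (st.1 ++ [st.2], st.2.reverse.map (fun x => x * scale)))
      ([], init.1)).1

-- ===== PRECONDITION & SPEC =====
def Spec_getWeightBoard (size : Int) (out : List (List Int)) : Prop := out = getWeightBoard_alt size
instance (size : Int) (out : List (List Int)) : Decidable (Spec_getWeightBoard size out) := by unfold Spec_getWeightBoard; infer_instance

-- ===== CLAIM (what is proved, stated in full; the proofs are below) =====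
def Claim_equal_getWeightBoard : Prop := ∀ (size : Int), Dom_getWeightBoard size → Spec_getWeightBoard size (getWeightBoard size)

-- ===== LEMMAS AND PROOFS =====

-- the r-th snake row of an n×n board, as a closed form both ports are reduced to
def pvSnakeRow (n r : Nat) : List Int :=
  (List.range n).map (fun c => (4 : Int) ^ (r * n + (if r % 2 = 0 then c else n - 1 - c)))

theorem pv_modify_id {α : Type} (l : List α) (i : Nat) : l.modify i (fun x => x) = l := by
  apply List.ext_getElem (by simp)
  intro j h1 h2
  rw [List.getElem_modify]
  split <;> rfl

theorem pv_modify_modify {α : Type} (l : List α) (i : Nat) (f g : α → α) :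
    (l.modify i f).modify i g = l.modify i (fun x => g (f x)) := by
  apply List.ext_getElem (by simp)
  intro j h1 h2
  rw [List.getElem_modify, List.getElem_modify, List.getElem_modify]
  split <;> rfl

-- fold of single-index modifies over range n = mapIdx with an index guard
theorem pv_foldl_modify_range {α : Type} (F : Nat → α → α) (n : Nat) (l : List α) :
    (List.range n).foldl (fun b i => b.modify i (F i)) l
      = l.mapIdx (fun i x => if i < n then F i x else x) := by
  induction n with
  | zero =>
    simp only [List.range_zero, List.foldl_nil, Nat.not_lt_zero, if_false]
    exact (List.ext_getElem (by simp) (by intro j h1 h2; simp)).symm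
  | succ n ih =>
    rw [List.range_succ, List.foldl_append, ih]
    apply List.ext_getElem (by simp)
    intro j h1 h2
    simp only [List.foldl_cons, List.foldl_nil, List.getElem_modify, List.getElem_mapIdx]
    rcases eq_or_ne n j with h | h
    · subst h; simp
    · simp only [h, if_false]
      split_ifs with h3 h4 h4 <;> first | rfl | omega

-- fold of modifies at one fixed outer index = one modify with the inner fold
theorem pv_foldl_modify_outer {α β : Type} (cs : List β) (i : Nat)
    (g : β → α → α) (b : List α) :
    cs.foldl (fun b c => b.modify i (g c)) b
      = b.modify i (fun r => cs.foldl (fun r c => g c r) r) := by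
  induction cs generalizing b with
  | nil => simp [pv_modify_id]
  | cons c cs ih => simp [List.foldl_cons, ih, pv_modify_modify]

-- A's port equals the snake-row closed form
theorem pv_A_closed (size : Int) :
    getWeightBoard size = (List.range size.toNat).map (pvSnakeRow size.toNat) := by
  unfold getWeightBoard
  rw [PySem.List.pyRange_one]
  simp only [zero_add, sub_zero, List.foldl_map]
  set n := size.toNat with hn
  have hstep : (fun (b : List (List Int)) (k : Nat) =>
        if (k : Int) % 2 ≠ 0 then
          b.modify ((k : Int)).toNat (fun r => (PySem.List.slice? r none none (-1)).getD [])
        else b)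
      = (fun (b : List (List Int)) (k : Nat) =>
        b.modify k (fun r => if (k : Int) % 2 ≠ 0 then r.reverse else r)) := by
    funext b k
    by_cases h : (k : Int) % 2 ≠ 0 <;>
      simp [h, pv_modify_id, PySem.List.slice?_none_none_neg_one]
  rw [hstep, pv_foldl_modify_range]
  have hstep3 : (fun (b : List (List Int)) (k : Nat) =>
        (List.range n).foldl (fun b c =>
          b.modify ((k : Int)).toNat (fun r => r.modify ((c : Int)).toNat (fun e => 4 ^ e.toNat))) b)
      = (fun (b : List (List Int)) (k : Nat) =>
        b.modify k (fun r => r.mapIdx (fun i x => if i < n then 4 ^ x.toNat else x))) := by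
    funext b k
    rw [pv_foldl_modify_outer]
    simp only [Int.toNat_natCast]
    congr 1
    funext r
    exact pv_foldl_modify_range (fun _ x => 4 ^ x.toNat) n r
  rw [hstep3, pv_foldl_modify_range]
  apply List.ext_getElem (by simp)
  intro i hi1 hi2
  have hin : i < n := by simpa using hi1
  have hsz : (n : Int) = size := by omega
  simp only [List.getElem_mapIdx, List.getElem_map, List.getElem_range, hin, if_pos,
    pvSnakeRow]
  apply List.ext_getElem (by by_cases h : (i : Int) % 2 ≠ 0 <;> simp [h])
  intro k hk1 hk2
  have hkn : k < n := by
    by_cases h : (i : Int) % 2 ≠ 0 <;> simp [h] at hk1 <;> omega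
  by_cases hpar : (i : Int) % 2 = 0
  · have hip : i % 2 = 0 := by omega
    simp only [hpar, ne_eq, not_true_eq_false, if_false, List.getElem_mapIdx,
      List.getElem_map, List.getElem_range, hkn, if_pos, hip]
    congr 1
    have : (i : Int) * size + (k : Int) = ((i * n + k : Nat) : Int) := by push_cast [hsz]; ring
    rw [this, Int.toNat_natCast]
  · have hip : ¬ i % 2 = 0 := by omega
    simp only [ne_eq, hpar, not_false_eq_true, if_pos, List.getElem_mapIdx,
      List.getElem_reverse, List.getElem_map, List.getElem_range,
      List.length_map, List.length_range, hip, if_false]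
    have hlt : n - 1 - k < n := by omega
    simp only [if_pos, hkn, if_pos]
    congr 1
    have : (i : Int) * size + ((n - 1 - k : Nat) : Int)
        = ((i * n + (n - 1 - k) : Nat) : Int) := by push_cast [hsz]; ring
    rw [this, Int.toNat_natCast]

-- B's first loop: running products give the powers of 4 and scale = 4^k
theorem pv_B_init (k : Nat) :
    (List.range k).foldl
        (fun (st : List Int × Int × Int) (_ : Nat) =>
          (st.1 ++ [st.2.1], st.2.1 * 4, st.2.2 * 4)) ([], 1, 1)
      = ((List.range k).map (fun c => (4 : Int) ^ c), 4 ^ k, 4 ^ k) := by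
  induction k with
  | zero => simp
  | succ k ih =>
    rw [List.range_succ, List.foldl_append, ih]
    simp [pow_succ]

-- the row recurrence: reversing and scaling by 4^n advances the snake row
theorem pv_row_step (n r : Nat) :
    (pvSnakeRow n r).reverse.map (fun x => x * (4 : Int) ^ n) = pvSnakeRow n (r + 1) := by
  unfold pvSnakeRow
  apply List.ext_getElem (by simp)
  intro c h1 h2
  have hc : c < n := by simpa using h2
  simp only [List.getElem_map, List.getElem_reverse, List.getElem_range,
    List.length_map, List.length_range, ← pow_add]
  congr 1
  by_cases h : r % 2 = 0
  · have h1 : ¬ (r + 1) % 2 = 0 := by omega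
    simp only [h, if_pos, h1, if_false, Nat.succ_mul]; omega
  · have h1 : (r + 1) % 2 = 0 := by omega
    simp only [h, if_false, h1, if_pos, Nat.succ_mul]; omega

-- B's second loop, with invariant
theorem pv_B_loop (n : Nat) : ∀ (k : Nat),
    (List.range k).foldl
        (fun (st : List (List Int) × List Int) (_ : Nat) =>
          (st.1 ++ [st.2], st.2.reverse.map (fun x => x * (4 : Int) ^ n)))
        ([], pvSnakeRow n 0)
      = ((List.range k).map (pvSnakeRow n), pvSnakeRow n k) := by
  intro k
  induction k with
  | zero => simp
  | succ k ih =>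
    rw [List.range_succ, List.foldl_append, ih]
    simp only [List.foldl_cons, List.foldl_nil, List.map_append, List.map_cons,
      List.map_nil, Prod.mk.injEq, List.map_reverse]
    exact ⟨trivial, by rw [← List.map_reverse]; exact pv_row_step n k⟩

theorem pv_B_closed (size : Int) :
    getWeightBoard_alt size = (List.range size.toNat).map (pvSnakeRow size.toNat) := by
  unfold getWeightBoard_alt
  rw [PySem.List.pyRange_one]
  simp only [zero_add, sub_zero, List.foldl_map]
  set n := size.toNat with hn
  rw [pv_B_init]
  have h0 : (List.range n).map (fun c => (4 : Int) ^ c) = pvSnakeRow n 0 := by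
    unfold pvSnakeRow; simp
  rw [h0, pv_B_loop]

-- ===== VERDICT (by name: the statement is the Claim_ definition above) =====
theorem getWeightBoard_spec : Claim_equal_getWeightBoard := by
  intro size _
  unfold Spec_getWeightBoard
  rw [pv_A_closed, pv_B_closed]
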